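-- pv_equiv track=rewrite | github.com/JakubZojdzik/WordsCounting | main.py | find_third_slash
-- ===== SOURCE A (Python) =====
-- def find_third_slash(url) :
--     occur = 0;
--     for i in range(len(url)) :
--         if(url[i] == "/") :
--             occur += 1;
--         if (occur == 3) :
--             return i;
--     return -1;
-- ===== SOURCE B (Python) =====
-- def find_third_slash(url):
--     p = -1
--     for _ in range(3):
--         p = url.find('/', p + 1)
--         if p == -1:
--             return -1
--     return p
-- ===== Notes on version B (the rewrite author's own statement) =====
-- stated objective: idiomatic
-- what changed: Replaced the char-by-char scan with a slash counter by three str.find hops, each starting just past the previous slash and keeping only the last-found position.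
import Mathlib
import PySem

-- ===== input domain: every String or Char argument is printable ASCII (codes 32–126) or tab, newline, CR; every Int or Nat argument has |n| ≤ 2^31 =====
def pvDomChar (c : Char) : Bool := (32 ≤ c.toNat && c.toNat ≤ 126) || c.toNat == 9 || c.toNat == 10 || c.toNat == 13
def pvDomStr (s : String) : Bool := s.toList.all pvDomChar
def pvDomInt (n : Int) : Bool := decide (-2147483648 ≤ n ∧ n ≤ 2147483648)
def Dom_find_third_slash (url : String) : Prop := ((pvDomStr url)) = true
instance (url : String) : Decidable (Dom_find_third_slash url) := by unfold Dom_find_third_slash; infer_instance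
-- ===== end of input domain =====

-- B replaces A's char-by-char counting scan with three find-hops (str.find from just past the previous slash); same O(n) cost, more idiomatic.


-- ===== PORT A =====
-- the for-loop over range(len(url)) with the running slash counter `occur`
def goA : List Char → Nat → Nat → Int
  | [], _, _ => -1
  | c :: rest, i, occur =>
    let occur' := if c = '/' then occur + 1 else occur
    if occur' = 3 then (i : Int) else goA rest (i + 1) occur'

def find_third_slash (url : String) : Int := goA url.toList 0 0

-- ===== PORT B =====
-- the for _ in range(3) loop: p = url.find('/', p + 1), early return on -1
def bloop (url : String) : Int → Nat → Int
  | p, 0 => p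
  | p, Nat.succ n =>
    let q := PySem.Str.findFrom url "/" (p + 1) none
    if q = -1 then -1 else bloop url q n

def find_third_slash_alt (url : String) : Int := bloop url (-1) 3

-- ===== PRECONDITION & SPEC =====
def Spec_find_third_slash (url : String) (out : Int) : Prop := out = find_third_slash_alt url
instance (url : String) (out : Int) : Decidable (Spec_find_third_slash url out) := by unfold Spec_find_third_slash; infer_instance

-- ===== CLAIM (what is proved, stated in full; the proofs are below) =====
def Claim_equal_find_third_slash : Prop := ∀ (url : String), Dom_find_third_slash url → Spec_find_third_slash url (find_third_slash url)

-- ===== LEMMAS AND PROOFS =====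

-- canonical form both ports are reduced to: absolute index of the n-th slash from base i, or -1
def seek : List Char → Nat → Nat → Int
  | [], _, _ => -1
  | c :: rest, i, n =>
    if c = '/' then (if n = 1 then (i : Int) else seek rest (i + 1) (n - 1))
    else seek rest (i + 1) n

lemma prefix_slash_iff (l : List Char) (j : Nat) :
    ['/'] <+: l.drop j ↔ l[j]? = some '/' := by
  constructor
  · rintro ⟨t, ht⟩
    have h : (l.drop j).head? = some '/' := by rw [← ht]; rfl
    simpa [List.head?_drop] using h
  · intro h
    have h' : (l.drop j).head? = some '/' := by simpa [List.head?_drop] using h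
    cases hd : l.drop j with
    | nil => simp [hd] at h'
    | cons c t =>
      rw [hd] at h'
      simp at h'
      exact ⟨t, by simp [h']⟩

lemma findC (l : List Char) : PySem.Chars.find l ['/'] =
    (match l.findIdx? (· == '/') with | some j => (j : Int) | none => -1) := by
  cases h : l.findIdx? (· == '/') with
  | none =>
    simp only []
    rw [PySem.Chars.find_eq_neg_one_iff]
    intro hinf
    have hex : ∃ j, ['/'] <+: l.drop j :=
      (PySem.Chars.exists_prefix_drop_iff_isIn _ _).mpr
        ((PySem.Chars.isIn_iff_infix _ _).mpr hinf)
    obtain ⟨j, hj⟩ := hex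
    have hmem : '/' ∈ l := List.mem_of_getElem? ((prefix_slash_iff l j).mp hj)
    have := List.findIdx?_eq_none_iff.mp h '/' hmem
    simp at this
  | some j =>
    simp only []
    obtain ⟨hjlt, hpj, hmin⟩ := List.findIdx?_eq_some_iff_getElem.mp h
    have hpre : ['/'] <+: l.drop j := (prefix_slash_iff l j).mpr (by
      rw [List.getElem?_eq_getElem hjlt]
      simpa using hpj)
    have hnn : 0 ≤ PySem.Chars.find l ['/'] :=
      (PySem.Chars.find_nonneg_iff _ _).mpr
        (hpre.isInfix.trans (l.drop_suffix j).isInfix)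
    obtain ⟨hp, hm⟩ := PySem.Chars.find_spec hnn
    have h1 : (PySem.Chars.find l ['/']).toNat ≤ j := by
      by_contra hlt
      exact hm j (by omega) hpre
    have h2 : j ≤ (PySem.Chars.find l ['/']).toNat := by
      by_contra hlt
      have hlen : (PySem.Chars.find l ['/']).toNat < l.length := by omega
      have hget : l[(PySem.Chars.find l ['/']).toNat]? = some '/' :=
        (prefix_slash_iff l _).mp hp
      have hval : l[(PySem.Chars.find l ['/']).toNat] = '/' := by
        rw [List.getElem?_eq_getElem hlen] at hget
        simpa using hget
      have hcon := hmin (PySem.Chars.find l ['/']).toNat (by omega)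
      exact hcon (by simp [hval])
    omega

lemma seek_none (l : List Char) : ∀ (i n : Nat),
    l.findIdx? (· == '/') = none → seek l i n = -1 := by
  induction l with
  | nil => intro i n _; rfl
  | cons c rest ih =>
    intro i n h
    rw [List.findIdx?_cons] at h
    by_cases hc : c = '/'
    · simp [hc] at h
    · rw [if_neg (by simp [hc])] at h
      simp [seek, hc, ih (i + 1) n (Option.map_eq_none_iff.mp h)]

lemma seek_idx (l : List Char) : ∀ (i : Nat), seek l i 1 =
    (match l.findIdx? (· == '/') with | some j => ((i + j : Nat) : Int) | none => -1) := by
  induction l with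
  | nil => intro i; rfl
  | cons c rest ih =>
    intro i
    rw [List.findIdx?_cons]
    by_cases hc : c = '/'
    · simp [seek, hc]
    · simp only [seek, hc, if_false, beq_iff_eq, ih (i + 1)]
      cases h : rest.findIdx? (· == '/') with
      | none => simp
      | some j =>
        simp only [Option.map_some]
        congr 1
        omega

lemma seek_succ (l : List Char) (m : Nat) : ∀ (i : Nat), seek l i (m + 2) =
    (match l.findIdx? (· == '/') with
     | none => -1
     | some j => seek (l.drop (j + 1)) (i + j + 1) (m + 1)) := by
  induction l with
  | nil => intro i; rfl
  | cons c rest ih =>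
    intro i
    rw [List.findIdx?_cons]
    by_cases hc : c = '/'
    · simp [seek, hc]
    · simp only [seek, hc, if_false, beq_iff_eq, ih (i + 1)]
      cases h : rest.findIdx? (· == '/') with
      | none => simp
      | some j =>
        simp only [Option.map_some, List.drop_succ_cons]
        congr 1
        omega

lemma goA_eq_seek (l : List Char) : ∀ (i occur : Nat), occur < 3 →
    goA l i occur = seek l i (3 - occur) := by
  induction l with
  | nil => intro i occur _; rfl
  | cons c rest ih =>
    intro i occur h3
    by_cases hc : c = '/'
    · by_cases ho : occur = 2
      · simp [goA, seek, hc, ho]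
      · have h1 : occur + 1 ≠ 3 := by omega
        have h2 : 3 - occur ≠ 1 := by omega
        rw [show goA (c :: rest) i occur = goA rest (i + 1) (occur + 1) from by
              simp [goA, hc, h1],
            show seek (c :: rest) i (3 - occur) = seek rest (i + 1) (3 - occur - 1) from by
              simp [seek, hc, h2],
            ih (i + 1) (occur + 1) (by omega),
            show 3 - (occur + 1) = 3 - occur - 1 from by omega]
    · have h1 : occur ≠ 3 := by omega
      rw [show goA (c :: rest) i occur = goA rest (i + 1) occur from by simp [goA, hc, h1],
          show seek (c :: rest) i (3 - occur) = seek rest (i + 1) (3 - occur) from by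
            simp [seek, hc]]
      exact ih (i + 1) occur h3

lemma bloop_eq (n : Nat) : ∀ (url : String) (k : Nat), k ≤ url.toList.length →
    bloop url ((k : Int) - 1) (n + 1) = seek (url.toList.drop k) k (n + 1) := by
  induction n with
  | zero =>
    intro url k hk
    show (if PySem.Str.findFrom url "/" ((k : Int) - 1 + 1) none = -1 then -1
          else PySem.Str.findFrom url "/" ((k : Int) - 1 + 1) none) = _
    rw [show (k : Int) - 1 + 1 = (k : Int) from by ring, PySem.Str.findFrom_eq,
        show ("/" : String).toList = ['/'] from rfl,
        PySem.Chars.findFrom_natCast _ _ k hk, findC, seek_idx]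
    cases h : (url.toList.drop k).findIdx? (· == '/') with
    | none => simp
    | some j =>
      rw [if_neg (show ¬((j : Int) = -1) by omega),
          if_neg (show ¬((k : Int) + (j : Int) = -1) by omega)]
      push_cast
      ring
  | succ m ih =>
    intro url k hk
    show (if PySem.Str.findFrom url "/" ((k : Int) - 1 + 1) none = -1 then -1
          else bloop url (PySem.Str.findFrom url "/" ((k : Int) - 1 + 1) none) (m + 1)) = _
    rw [show (k : Int) - 1 + 1 = (k : Int) from by ring, PySem.Str.findFrom_eq,
        show ("/" : String).toList = ['/'] from rfl,
        PySem.Chars.findFrom_natCast _ _ k hk, findC]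
    cases h : (url.toList.drop k).findIdx? (· == '/') with
    | none =>
      simp only [reduceIte]
      exact (seek_none _ k (m + 2) h).symm
    | some j =>
      have hq : (if (j : Int) = -1 then (-1 : Int) else (k : Int) + (j : Int)) = (k : Int) + (j : Int) :=
        if_neg (by omega)
      rw [hq, if_neg (show ¬((k : Int) + (j : Int) = -1) by omega)]
      have hjlt : j < (url.toList.drop k).length :=
        (List.findIdx?_eq_some_iff_getElem.mp h).1
      have hklen : k + j + 1 ≤ url.toList.length := by
        rw [List.length_drop] at hjlt; omega
      rw [show (k : Int) + (j : Int) = ((k + j + 1 : Nat) : Int) - 1 from by push_cast; ring,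
          ih url (k + j + 1) hklen, seek_succ _ m k, h]
      simp [List.drop_drop, show k + (j + 1) = k + j + 1 from by omega]

-- ===== VERDICT (by name: the statement is the Claim_ definition above) =====
theorem find_third_slash_spec : Claim_equal_find_third_slash := by
  intro url _
  show find_third_slash url = find_third_slash_alt url
  have hA : find_third_slash url = seek url.toList 0 3 :=
    goA_eq_seek url.toList 0 0 (by omega)
  have hB : find_third_slash_alt url = seek url.toList 0 3 := by
    show bloop url (-1) 3 = _
    simpa using bloop_eq 2 url 0 (by omega)
  rw [hA, hB]
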